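-- pv_equiv track=rewrite | github.com/session-foundation/session-staking-backend | sent.py | parse_int_field
-- ===== SOURCE A (Python) =====
-- def parse_int_field(k, v, irange):
--     if (
--         len(v) == 0
--         or not all(c in "0123456789" for c in v)
--         or (len(v) > 1 and v[0] == "0")
--     ):
--         raise ParseError(k, "an integer value is required")
--     v = int(v)
--     imin, imax = irange
--     if imin <= v <= imax:
--         return v
--     raise ParseError(k, f"expected an integer between {imin} and {imax}")
--
-- class ParseError(ValueError):
--     def __init__(self, field, reason):
--         self.field = field
--         super().__init__(f"{field}: {reason}")
-- ===== SOURCE B (Python) =====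
-- class ParseError(ValueError):
--     def __init__(self, field, reason):
--         self.field = field
--         super().__init__(f"{field}: {reason}")
--
--
-- def parse_int_field(k, v, irange):
--     # Validation by an explicit finite-state machine recognising the grammar
--     # of a canonical decimal literal 0 | [1-9][0-9]*
--     # states: 0 = start, 1 = matched "0", 2 = matched [1-9][0-9]*, -1 = dead
--     state = 0
--     for c in v:
--         if state == 0:
--             state = 1 if c == "0" else 2 if "1" <= c <= "9" else -1
--         elif state == 2:
--             state = 2 if "0" <= c <= "9" else -1
--         else:
--             state = -1
--     if state != 1 and state != 2:
--         raise ParseError(k, "an integer value is required")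
--     n = int(v)
--     imin, imax = irange
--     if imin <= n <= imax:
--         return n
--     raise ParseError(k, f"expected an integer between {imin} and {imax}")
-- ===== Notes on version B (the rewrite author's own statement) =====
-- stated objective: alternative
-- what changed: A validates with three declarative guards (empty check, all()-membership of each character in the string "0123456789", leading-zero test on v[0]); B instead runs an explicit finite-state machine (states start / matched-zero / in-number / dead) over the characters that recognises the grammar of a canonical decimal literal 0 | [1-9][0-9]* in one stateful pass, then converts and range-checks as before. Pre_ excludes exactly the inputs on which A raises ParseError (invalid literal or value out of range); B raises the identical errors there.
import Mathlib
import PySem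

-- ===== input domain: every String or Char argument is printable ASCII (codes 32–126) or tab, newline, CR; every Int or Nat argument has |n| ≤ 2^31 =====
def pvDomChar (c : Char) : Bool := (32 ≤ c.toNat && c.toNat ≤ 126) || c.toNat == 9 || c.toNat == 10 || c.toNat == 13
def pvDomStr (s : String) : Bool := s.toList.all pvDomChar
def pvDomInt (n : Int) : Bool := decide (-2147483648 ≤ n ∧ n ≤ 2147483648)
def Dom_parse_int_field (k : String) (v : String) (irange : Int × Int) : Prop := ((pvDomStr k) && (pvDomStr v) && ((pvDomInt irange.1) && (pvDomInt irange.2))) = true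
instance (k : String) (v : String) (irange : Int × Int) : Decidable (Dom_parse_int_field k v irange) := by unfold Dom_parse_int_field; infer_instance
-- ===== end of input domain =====

-- B replaces A's three declarative guards (empty / all()-digit-membership / leading zero) by an
-- explicit finite-state machine over the characters recognising 0 | [1-9][0-9]* (alternative, not faster).


-- ===== PORT A =====
-- raise ParseError is modelled by returning 0; those inputs are excluded by Pre_parse_int_field.
def parse_int_field (k : String) (v : String) (irange : Int × Int) : Int :=
  if (v.toList.length == 0)
     || !(v.toList.all (fun c => ("0123456789".toList).contains c))
     || (decide (1 < v.toList.length) && (PySem.List.pyGet? v.toList 0 == some '0'))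
  then 0  -- raise ParseError(k, "an integer value is required")
  else
    let n := (PySem.Int.ofStr? v).getD 0  -- v = int(v); cannot fail on the validated string
    let imin := irange.1
    let imax := irange.2
    if decide (imin ≤ n) && decide (n ≤ imax) then n
    else 0  -- raise ParseError(k, f"expected an integer between {imin} and {imax}")

-- ===== PORT B =====
-- one step of the state machine: states 0 = start, 1 = matched "0", 2 = matched [1-9][0-9]*, -1 = dead
def pvDfaStep (state : Int) (c : Char) : Int :=
  if state = 0 then (if c = '0' then 1 else if '1' ≤ c ∧ c ≤ '9' then 2 else -1)
  else if state = 2 then (if '0' ≤ c ∧ c ≤ '9' then 2 else -1)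
  else -1

def parse_int_field_alt (k : String) (v : String) (irange : Int × Int) : Int :=
  let state := v.toList.foldl pvDfaStep 0  -- the for-loop over the characters of v
  if state ≠ 1 ∧ state ≠ 2 then 0  -- raise ParseError(k, "an integer value is required")
  else
    let n := (PySem.Int.ofStr? v).getD 0  -- n = int(v); cannot fail on the accepted string
    let imin := irange.1
    let imax := irange.2
    if decide (imin ≤ n) && decide (n ≤ imax) then n
    else 0  -- raise ParseError(k, f"expected an integer between {imin} and {imax}")

-- ===== PRECONDITION & SPEC =====
-- Pre_ excludes exactly the inputs on which A raises ParseError: v not a canonical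
-- non-negative decimal literal, or the parsed value outside [imin, imax].
def Pre_parse_int_field (k : String) (v : String) (irange : Int × Int) : Prop :=
  v.toList ≠ [] ∧
  (v.toList.all (fun c => 48 ≤ c.toNat && c.toNat ≤ 57)) = true ∧
  ¬ (1 < v.toList.length ∧ v.toList.head? = some '0') ∧
  irange.1 ≤ (PySem.Int.ofStr? v).getD 0 ∧ (PySem.Int.ofStr? v).getD 0 ≤ irange.2
instance (k : String) (v : String) (irange : Int × Int) : Decidable (Pre_parse_int_field k v irange) := by
  unfold Pre_parse_int_field; infer_instance

def pvWitness_parse_int_field : String × String × (Int × Int) := ("count", "42", (0, 100))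

def Spec_parse_int_field (k : String) (v : String) (irange : Int × Int) (out : Int) : Prop := out = parse_int_field_alt k v irange
instance (k : String) (v : String) (irange : Int × Int) (out : Int) : Decidable (Spec_parse_int_field k v irange out) := by unfold Spec_parse_int_field; infer_instance

-- ===== CLAIM (what is proved, stated in full; the proofs are below) =====
def Claim_equal_parse_int_field : Prop := ∀ (k : String) (v : String) (irange : Int × Int), Dom_parse_int_field k v irange → Pre_parse_int_field k v irange → Spec_parse_int_field k v irange (parse_int_field k v irange)

-- ===== LEMMAS AND PROOFS =====

-- Char order read off on code points
lemma pv_char_le_iff (a b : Char) : a ≤ b ↔ a.toNat ≤ b.toNat := by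
  simp [Char.le_def, UInt32.le_iff_toNat_le]

lemma pv_char_eq_of_toNat (c d : Char) (h : c.toNat = d.toNat) : c = d :=
  Char.ext (UInt32.toNat_inj.mp (by simpa using h))

-- a character in the inclusive code-point range 48..57 is one of the ten digit characters
lemma pv_digit_mem (c : Char) (h0 : 48 ≤ c.toNat) (h9 : c.toNat ≤ 57) :
    (("0123456789".toList).contains c) = true := by
  have hten : c.toNat = 48 ∨ c.toNat = 49 ∨ c.toNat = 50 ∨ c.toNat = 51 ∨ c.toNat = 52 ∨
      c.toNat = 53 ∨ c.toNat = 54 ∨ c.toNat = 55 ∨ c.toNat = 56 ∨ c.toNat = 57 := by omega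
  rcases hten with h|h|h|h|h|h|h|h|h|h
  · rw [pv_char_eq_of_toNat c '0' (h.trans (by decide))]; decide
  · rw [pv_char_eq_of_toNat c '1' (h.trans (by decide))]; decide
  · rw [pv_char_eq_of_toNat c '2' (h.trans (by decide))]; decide
  · rw [pv_char_eq_of_toNat c '3' (h.trans (by decide))]; decide
  · rw [pv_char_eq_of_toNat c '4' (h.trans (by decide))]; decide
  · rw [pv_char_eq_of_toNat c '5' (h.trans (by decide))]; decide
  · rw [pv_char_eq_of_toNat c '6' (h.trans (by decide))]; decide
  · rw [pv_char_eq_of_toNat c '7' (h.trans (by decide))]; decide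
  · rw [pv_char_eq_of_toNat c '8' (h.trans (by decide))]; decide
  · rw [pv_char_eq_of_toNat c '9' (h.trans (by decide))]; decide

lemma pv_pyGet_zero (cs : List Char) (h : cs ≠ []) : PySem.List.pyGet? cs 0 = cs.head? := by
  simp [PySem.List.pyGet?, PySem.List.pyIdx?]
  cases cs with
  | nil => simp at h
  | cons a t => simp

-- A's triple guard is false on a canonical literal
lemma pv_guardA_false (v : String)
    (hne : v.toList ≠ [])
    (hdig : ∀ c ∈ v.toList, 48 ≤ c.toNat ∧ c.toNat ≤ 57)
    (hlz : ¬ (1 < v.toList.length ∧ v.toList.head? = some '0')) :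
    ((v.toList.length == 0)
     || !(v.toList.all (fun c => ("0123456789".toList).contains c))
     || (decide (1 < v.toList.length) && (PySem.List.pyGet? v.toList 0 == some '0'))) = false := by
  have h1 : (v.toList.length == 0) = false := by
    rw [beq_eq_false_iff_ne]
    simpa [List.length_eq_zero_iff] using hne
  have h2 : (v.toList.all (fun c => ("0123456789".toList).contains c)) = true := by
    rw [List.all_eq_true]
    intro c hc
    exact pv_digit_mem c (hdig c hc).1 (hdig c hc).2
  have h3 : (decide (1 < v.toList.length) && (PySem.List.pyGet? v.toList 0 == some '0')) = false := by
    by_cases hl : 1 < v.toList.length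
    · have : v.toList.head? ≠ some '0' := fun h => hlz ⟨hl, h⟩
      simp [pv_pyGet_zero v.toList hne, this]
    · rw [decide_eq_false hl, Bool.false_and]
  rw [h1, h2, h3]
  rfl

-- the in-number state 2 absorbs any digit suffix
lemma pv_dfa_two (cs : List Char)
    (hdig : ∀ c ∈ cs, 48 ≤ c.toNat ∧ c.toNat ≤ 57) :
    cs.foldl pvDfaStep 2 = 2 := by
  induction cs with
  | nil => rfl
  | cons c rest ih =>
    have hc := hdig c List.mem_cons_self
    have h0 : '0' ≤ c := (pv_char_le_iff '0' c).mpr hc.1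
    have h9 : c ≤ '9' := (pv_char_le_iff c '9').mpr hc.2
    have hstep : pvDfaStep 2 c = 2 := by
      simp [pvDfaStep, h0, h9]
    rw [List.foldl_cons, hstep]
    exact ih (fun d hd => hdig d (List.mem_cons_of_mem c hd))

-- the state machine accepts every canonical literal
lemma pv_dfa_accept (v : String)
    (hne : v.toList ≠ [])
    (hdig : ∀ c ∈ v.toList, 48 ≤ c.toNat ∧ c.toNat ≤ 57)
    (hlz : ¬ (1 < v.toList.length ∧ v.toList.head? = some '0')) :
    v.toList.foldl pvDfaStep 0 = 1 ∨ v.toList.foldl pvDfaStep 0 = 2 := by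
  cases hcs : v.toList with
  | nil => exact absurd hcs hne
  | cons c rest =>
    have hc : 48 ≤ c.toNat ∧ c.toNat ≤ 57 := hdig c (by rw [hcs]; exact List.mem_cons_self)
    have hrest : ∀ d ∈ rest, 48 ≤ d.toNat ∧ d.toNat ≤ 57 := by
      intro d hd; exact hdig d (by rw [hcs]; exact List.mem_cons_of_mem c hd)
    by_cases hz : c = '0'
    · -- leading '0': Pre_ forces rest = []
      cases rest with
      | nil =>
        left
        rw [List.foldl_cons, List.foldl_nil]
        simp [pvDfaStep, hz]
      | cons d t =>
        exfalso
        exact hlz ⟨by rw [hcs]; simp, by rw [hcs, hz]; rfl⟩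
    · -- leading digit 1..9: enter state 2 and stay there
      right
      have h1 : '1' ≤ c := by
        refine (pv_char_le_iff '1' c).mpr ?_
        have : c.toNat ≠ 48 := fun h => hz (pv_char_eq_of_toNat c '0' (h.trans (by decide)))
        have h49 : '1'.toNat = 49 := rfl
        omega
      have h9 : c ≤ '9' := (pv_char_le_iff c '9').mpr hc.2
      have hstep : pvDfaStep 0 c = 2 := by
        simp [pvDfaStep, hz, h1, h9]
      rw [List.foldl_cons, hstep]
      exact pv_dfa_two rest hrest

-- ===== VERDICT (by name: the statement is the Claim_ definition above) =====
theorem parse_int_field_spec : Claim_equal_parse_int_field := by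
  intro k v irange _hdom ⟨hne, hdigb, hlz, hlo, hhi⟩
  have hdig : ∀ c ∈ v.toList, 48 ≤ c.toNat ∧ c.toNat ≤ 57 := by
    intro c hc
    have := List.all_eq_true.mp hdigb c hc
    simpa using this
  have haccept : ¬ (v.toList.foldl pvDfaStep 0 ≠ 1 ∧ v.toList.foldl pvDfaStep 0 ≠ 2) := by
    rcases pv_dfa_accept v hne hdig hlz with h | h <;> simp [h]
  unfold Spec_parse_int_field parse_int_field parse_int_field_alt
  rw [pv_guardA_false v hne hdig hlz, if_neg haccept]
  simp only [Bool.false_eq_true, if_false]
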